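-- pv_equiv track=rewrite | github.com/gwshield/images | scripts/generate-readme.py | group_by_name
-- ===== SOURCE A (Python) =====
-- def group_by_name(entries: list[dict]) -> dict[str, list[dict]]:
--     groups: dict[str, list[dict]] = {}
--     for entry in entries:
--         name = entry.get("name", "unknown")
--         groups.setdefault(name, []).append(entry)
--     for name in groups:
--         groups[name].sort(key=lambda e: e.get("version", ""))
--     return dict(sorted(groups.items()))
-- ===== SOURCE B (Python) =====
-- def group_by_name(entries: list[dict]) -> dict[str, list[dict]]:
--     names = sorted({e.get("name", "unknown") for e in entries})
--     return {
--         n: sorted(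
--             (e for e in entries if e.get("name", "unknown") == n),
--             key=lambda e: e.get("version", ""),
--         )
--         for n in names
--     }
-- ===== Notes on version B (the rewrite author's own statement) =====
-- stated objective: simpler
-- what changed: Replaces the mutable setdefault-dict accumulation with per-group in-place sorts and a final items sort by one sorted() over the distinct names plus a per-name filter comprehension.
import Mathlib
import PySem

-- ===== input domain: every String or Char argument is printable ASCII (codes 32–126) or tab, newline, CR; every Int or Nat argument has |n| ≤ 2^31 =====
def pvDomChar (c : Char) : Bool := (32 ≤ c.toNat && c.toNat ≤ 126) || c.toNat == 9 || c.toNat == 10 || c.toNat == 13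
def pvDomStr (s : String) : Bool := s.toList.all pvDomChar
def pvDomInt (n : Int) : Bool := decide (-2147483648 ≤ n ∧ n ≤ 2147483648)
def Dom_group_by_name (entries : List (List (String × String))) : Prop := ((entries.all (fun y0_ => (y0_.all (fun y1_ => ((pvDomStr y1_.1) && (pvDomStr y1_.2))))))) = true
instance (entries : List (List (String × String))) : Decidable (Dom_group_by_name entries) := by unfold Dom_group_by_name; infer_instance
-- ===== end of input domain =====

-- B replaces A's setdefault-dict accumulation + per-group/in-place sorts by one sorted() over
-- the distinct names with a per-name filter comprehension (objective: simpler).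

-- entry.get(k, dflt): first-match lookup in the entry's association list (shared by both ports)
def pvGet (e : List (String × String)) (k dflt : String) : String :=
  (PySem.Dict.mk e).getD k dflt

def pvName (e : List (String × String)) : String := pvGet e "name" "unknown"
def pvVer (e : List (String × String)) : String := pvGet e "version" ""

-- ===== PORT A =====
def group_by_name (entries : List (List (String × String))) : List (String × List (List (String × String))) :=
  -- groups.setdefault(name, []).append(entry)  ≡  modify name [] (· ++ [entry])
  let groups := entries.foldl
    (fun d e => d.modify (pvName e) [] (· ++ [e]))
    (PySem.Dict.empty : PySem.Dict String (List (List (String × String))))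
  -- for name in groups: groups[name].sort(key=version)  — each value sorted in place
  let groups2 := PySem.Dict.mk (groups.items.map (fun p => (p.1, PySem.List.sorted p.2 pvVer false)))
  -- dict(sorted(groups.items())): keys are distinct, so Python's tuple comparison only ever
  -- reads the first component — sorting by the key is exact here
  PySem.List.sorted groups2.items (fun p => p.1) false

-- ===== PORT B =====
def group_by_name_alt (entries : List (List (String × String))) : List (String × List (List (String × String))) :=
  let names := PySem.List.sorted (PySem.Set.ofList (entries.map pvName)) (fun x => x) false
  names.map (fun n =>
    (n, PySem.List.sorted (entries.filter (fun e => pvName e == n)) pvVer false))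

-- ===== PRECONDITION & SPEC =====
def Spec_group_by_name (entries : List (List (String × String))) (out : List (String × List (List (String × String)))) : Prop := out = group_by_name_alt entries
instance (entries : List (List (String × String))) (out : List (String × List (List (String × String)))) : Decidable (Spec_group_by_name entries out) := by unfold Spec_group_by_name; infer_instance

-- ===== CLAIM (what is proved, stated in full; the proofs are below) =====
def Claim_equal_group_by_name : Prop := ∀ (entries : List (List (String × String))), Dom_group_by_name entries → Spec_group_by_name entries (group_by_name entries)

-- ===== LEMMAS AND PROOFS =====

theorem group_by_name_eq_alt (entries : List (List (String × String))) :
    group_by_name entries = group_by_name_alt entries := by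
  unfold group_by_name group_by_name_alt
  dsimp only
  set names := PySem.Set.ofList (entries.map pvName) with hnames
  set F : String → String × List (List (String × String)) :=
    fun n => (n, PySem.List.sorted (entries.filter (fun e => pvName e == n)) pvVer false) with hF
  set groups := entries.foldl
    (fun d e => d.modify (pvName e) [] (· ++ [e]))
    (PySem.Dict.empty : PySem.Dict String (List (List (String × String)))) with hg
  have hkeys : groups.keys = names := by
    rw [hg, PySem.Dict.keys_foldl_modify_key]
    simp [PySem.Set.update_nil_left, hnames]
  have hnd : groups.keys.Nodup := by
    rw [hg]
    exact PySem.Dict.nodup_keys_foldl_modify_key _ _ _ _ _ (by simp)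
  have hget : ∀ n, groups.getD n [] = entries.filter (fun e => pvName e == n) := by
    intro n
    have hfold : groups = (entries.map (fun e => (pvName e, e))).foldl
        (fun d p => d.modify p.1 [] (· ++ [p.2])) PySem.Dict.empty := by
      rw [hg, List.foldl_map]
    rw [hfold, PySem.Dict.getD_foldl_modify_append]
    simp [List.filter_map, Function.comp_def]
  have hitems : groups.items = names.map (fun k => (k, entries.filter (fun e => pvName e == k))) := by
    rw [PySem.Dict.items_eq_map_keys groups hnd ([] : List (List (String × String))), hkeys]
    exact List.map_congr_left (fun k _ => by rw [hget])
  rw [hitems, List.map_map]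
  have hcomp : ((fun p => (p.1, PySem.List.sorted p.2 pvVer false)) ∘
      (fun k => (k, entries.filter (fun e => pvName e == k)))) = F := by
    funext k; simp [hF]
  rw [hcomp]
  have hperm : ((PySem.List.sorted names (fun x => x) false).map F).Perm (names.map F) :=
    (PySem.List.sorted_perm names (fun x => x) false).map F
  have hpw : ((PySem.List.sorted names (fun x => x) false).map F).Pairwise
      (fun a b => (fun p => p.1) a < (fun p => p.1) b) := by
    have := PySem.List.sorted_ofList_pairwise_lt (entries.map pvName)
    rw [← hnames] at this
    exact List.Pairwise.map F (by intro a b h; simpa [hF] using h) this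
  exact PySem.List.sorted_eq_of_perm_of_pairwise_lt _ _ _ hperm hpw

-- ===== VERDICT (by name: the statement is the Claim_ definition above) =====
theorem group_by_name_spec : Claim_equal_group_by_name := by
  intro entries _
  exact group_by_name_eq_alt entries
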